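-- pv_equiv track=rewrite | github.com/zt2misay2/Crypto-Solver-Skill | tools/crypto-utils.py | find_small_factors
-- ===== SOURCE A (Python) =====
-- from typing import Tuple, List, Optional
--
-- def find_small_factors(n: int, limit: int = 1000) -> List[int]:
--     """
--     寻找小的因子
--
--     Args:
--         n: 要分解的数
--         limit: 素数限制
--
--     Returns:
--         小因子列表
--     """
--
--     factors = []
--
--     # 尝试小素数
--     for p in range(2, min(limit, int(n**0.5) + 1)):
--         if n % p == 0:
--             factors.append(p)
--             while n % p == 0:
--                 n //= p
--
--     return factors
-- ===== SOURCE B (Python) =====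
-- def find_small_factors(n: int, limit: int = 1000) -> list:
--     """Distinct small prime factors of n below min(limit, isqrt(n)+1).
--
--     Different strategy from the original: instead of walking every integer
--     and repeatedly dividing n down, compute the bound once and take the
--     primes (trial-division primality test up to sqrt(p)) that divide the
--     ORIGINAL n.  No mutation of n, a pure filter.
--     """
--     bound = min(limit, int(n**0.5) + 1)
--     return [p for p in range(2, bound)
--             if n % p == 0 and all(p % d != 0 for d in range(2, int(p**0.5) + 1))]
-- ===== Notes on version B (the rewrite author's own statement) =====
-- stated objective: alternative
-- what changed: Replaces the divide-out loop over every integer (mutating n) with a pure filter over the range that keeps p exactly when p is prime (trial division up to sqrt(p)) and p divides the original n; correctness rests on the fact that after dividing out smaller primes, an integer p divides the reduced n iff p is prime and divides the original n.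
import Mathlib
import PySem

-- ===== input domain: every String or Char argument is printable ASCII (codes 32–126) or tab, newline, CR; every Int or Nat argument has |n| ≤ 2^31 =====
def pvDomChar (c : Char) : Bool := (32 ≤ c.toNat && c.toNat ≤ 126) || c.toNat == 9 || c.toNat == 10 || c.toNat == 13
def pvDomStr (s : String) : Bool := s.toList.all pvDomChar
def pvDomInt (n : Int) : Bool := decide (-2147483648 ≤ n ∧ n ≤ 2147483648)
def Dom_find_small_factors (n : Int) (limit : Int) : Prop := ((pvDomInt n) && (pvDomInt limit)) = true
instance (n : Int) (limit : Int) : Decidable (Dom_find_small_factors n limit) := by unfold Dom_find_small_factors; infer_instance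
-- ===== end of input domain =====

-- B replaces A's divide-out loop over every integer with a pure filter keeping the primes
-- (trial division up to sqrt p) that divide the original n; same values, no speed claim.

-- ===== PORT A =====
-- 'while n % p == 0: n //= p'.  The extra '0 < m ∧ 2 ≤ p' in the guard is a termination
-- guard only: it holds at every state A's loop reaches (m ≥ 1 and p ≥ 2 there), so the
-- function computes exactly what the Python while-loop computes on those states.
def pvDivOut (m p : Int) : Int :=
  if h : PySem.Int.mod m p = 0 ∧ 0 < m ∧ 2 ≤ p then pvDivOut (PySem.Int.floordiv m p) p else m
  termination_by m.toNat
  decreasing_by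
    obtain ⟨h1, h2, h3⟩ := h
    rw [PySem.Int.floordiv_eq_ediv_of_pos (by omega)]
    have hq0 : 0 ≤ m / p := Int.ediv_nonneg (by omega) (by omega)
    have hqm : m / p < m := by
      have h1 := Int.mul_ediv_add_emod m p
      have h2' := Int.emod_nonneg m (show p ≠ 0 by omega)
      nlinarith [Int.ediv_nonneg (le_of_lt h2) (show (0:Int) ≤ p by omega)]
    omega

-- int(n**0.5) for 0 ≤ n ≤ 2^31 is exactly the integer square root (the float sqrt is
-- within 2^-38 of the true root there, never crossing an integer), ported as Int.sqrt.
def find_small_factors (n : Int) (limit : Int) : List Int :=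
  ((PySem.List.pyRange 2 (min limit (Int.sqrt n + 1)) 1).foldl
      (fun st p =>
        if PySem.Int.mod st.2 p = 0 then (st.1 ++ [p], pvDivOut st.2 p) else st)
      (([] : List Int), n)).1

-- ===== PORT B =====
-- all(p % d != 0 for d in range(2, int(p**0.5)+1))
def pvIsPrimeTrial (p : Int) : Bool :=
  (PySem.List.pyRange 2 (Int.sqrt p + 1) 1).all (fun d => !(PySem.Int.mod p d == 0))

def find_small_factors_alt (n : Int) (limit : Int) : List Int :=
  (PySem.List.pyRange 2 (min limit (Int.sqrt n + 1)) 1).filter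
    (fun p => (PySem.Int.mod n p == 0) && pvIsPrimeTrial p)

-- ===== PRECONDITION & SPEC =====
-- Pre_ excludes n < 0, on which the Python A raises TypeError (int() of the complex n**0.5).
def Pre_find_small_factors (n : Int) (limit : Int) : Prop := 0 ≤ n
instance (n : Int) (limit : Int) : Decidable (Pre_find_small_factors n limit) := by
  unfold Pre_find_small_factors; infer_instance

def pvWitness_find_small_factors : Int × Int := (720, 1000)

def Spec_find_small_factors (n : Int) (limit : Int) (out : List Int) : Prop :=
  out = find_small_factors_alt n limit
instance (n : Int) (limit : Int) (out : List Int) : Decidable (Spec_find_small_factors n limit out) := by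
  unfold Spec_find_small_factors; infer_instance

-- ===== CLAIM =====
def Claim_equal_find_small_factors : Prop :=
  ∀ (n : Int) (limit : Int), Dom_find_small_factors n limit →
    Pre_find_small_factors n limit →
    Spec_find_small_factors n limit (find_small_factors n limit)

-- ===== LEMMAS AND PROOFS =====

theorem divOut_spec (p : Int) (hp : 2 ≤ p) :
    ∀ N (m : Int), m.toNat = N → 0 < m →
      0 < pvDivOut m p ∧ ¬ p ∣ pvDivOut m p ∧ ∃ k : Nat, m = p ^ k * pvDivOut m p := by
  intro N
  induction N using Nat.strong_induction_on with
  | _ N ih =>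
    intro m hN hm
    rw [pvDivOut]
    by_cases hd : PySem.Int.mod m p = 0
    · rw [dif_pos ⟨hd, hm, hp⟩]
      have hdvd : p ∣ m := (PySem.Int.mod_eq_zero_iff_dvd m p).1 hd
      have hfd : PySem.Int.floordiv m p = m / p := PySem.Int.floordiv_eq_ediv_of_pos (by omega)
      have hpm : p ≤ m := Int.le_of_dvd hm hdvd
      have hm' : 0 < m / p := by
        have h := (Int.le_ediv_iff_mul_le (show (0:Int) < p by omega)).2
          (show 1 * p ≤ m by omega)
        omega
      have hlt : (m / p).toNat < N := by
        have h1 := Int.emod_add_mul_ediv m p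
        have h2 := Int.emod_nonneg m (show p ≠ 0 by omega)
        have h3 := Int.emod_lt_of_pos m (show 0 < p by omega)
        have : m / p < m := by nlinarith
        omega
      obtain ⟨h1, h2, k, hk⟩ := ih _ hlt (m / p) rfl hm'
      rw [hfd]
      refine ⟨h1, h2, k + 1, ?_⟩
      have : p * (m / p) = m := Int.mul_ediv_cancel' hdvd
      calc m = p * (m / p) := this.symm
        _ = p * (p ^ k * pvDivOut (m / p) p) := by rw [← hk]
        _ = p ^ (k + 1) * pvDivOut (m / p) p := by ring
    · rw [dif_neg (fun h => hd h.1)]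
      exact ⟨hm, fun h => hd ((PySem.Int.mod_eq_zero_iff_dvd m p).2 h), 0, by ring⟩

theorem int_prime_of_no_small_dvd (p : Int) (h2 : 2 ≤ p)
    (h : ∀ q : Int, 2 ≤ q → q < p → ¬ q ∣ p) : Prime p := by
  rw [Int.prime_iff_natAbs_prime, Nat.prime_def_lt]
  refine ⟨by omega, fun m hm hdvd => ?_⟩
  by_contra hne
  have hm2 : 2 ≤ m := by
    rcases Nat.lt_or_ge m 2 with h' | h'
    · interval_cases m
      · simp at hdvd; omega
      · omega
    · exact h'
  have hdvd' : (m : Int) ∣ p := by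
    have := Int.natCast_dvd_natCast.2 hdvd
    rwa [Int.natAbs_of_nonneg (by omega)] at this
  exact h m (by omega) (by omega) hdvd'

theorem isPrimeTrial_iff (p : Int) (h2 : 2 ≤ p) : pvIsPrimeTrial p = true ↔ Prime p := by
  unfold pvIsPrimeTrial
  rw [List.all_eq_true]
  have hsq : Int.sqrt p = ((Nat.sqrt p.toNat : Nat) : Int) := rfl
  have habs : p.natAbs = p.toNat := by omega
  constructor
  · intro h
    rw [Int.prime_iff_natAbs_prime, Nat.prime_def_le_sqrt]
    refine ⟨by omega, fun m hm hms hdvd => ?_⟩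
    rw [habs] at hms
    have hmem : (m : Int) ∈ PySem.List.pyRange 2 (Int.sqrt p + 1) 1 := by
      rw [PySem.List.mem_pyRange_one, hsq]
      constructor <;> omega
    have := h _ hmem
    have hdvd' : (m : Int) ∣ p := by
      have := Int.natCast_dvd_natCast.2 hdvd
      rwa [Int.natAbs_of_nonneg (by omega)] at this
    simp [PySem.Int.mod_eq_zero_iff_dvd, hdvd'] at this
  · intro hp d hd
    rw [PySem.List.mem_pyRange_one] at hd
    suffices hnd : ¬ (d ∣ p) by
      simp only [Bool.not_eq_eq_eq_not, Bool.not_true, beq_eq_false_iff_ne, ne_eq]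
      rw [PySem.Int.mod_eq_zero_iff_dvd]
      exact hnd
    intro hdvd
    rw [Int.prime_iff_natAbs_prime, Nat.prime_def_le_sqrt] at hp
    rw [habs] at hp
    refine hp.2 d.toNat (by omega) ?_ ?_
    · rw [hsq] at hd; omega
    · have := Int.natAbs_dvd_natAbs.2 hdvd
      have h' : d.natAbs = d.toNat := by omega
      rwa [h', habs] at this

theorem isPrimeTrial_eq (p : Int) (h2 : 2 ≤ p) : pvIsPrimeTrial p = decide (Prime p) := by
  rw [show pvIsPrimeTrial p = decide (pvIsPrimeTrial p = true) by simp]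
  exact decide_eq_decide.2 (isPrimeTrial_iff p h2)

theorem loopA (n : Int) (b : Int) :
    ∀ N (a m : Int) (acc : List Int), (b - a).toNat = N → 2 ≤ a → 0 < m → m ∣ n →
      (∀ q : Int, 2 ≤ q → q < a → ¬ q ∣ m) →
      (∀ p : Int, Prime p → a ≤ p → p ∣ n → p ∣ m) →
      ((PySem.List.pyRange a b 1).foldl
        (fun st p =>
          if PySem.Int.mod st.2 p = 0 then (st.1 ++ [p], pvDivOut st.2 p) else st)
        (acc, m)).1
      = acc ++ (PySem.List.pyRange a b 1).filter
          (fun p => decide (p ∣ n) && decide (Prime p)) := by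
  intro N
  induction N with
  | zero =>
    intro a m acc hN ha hm hmn hsmall hbig
    rw [PySem.List.pyRange_one_eq_nil (by omega)]
    simp
  | succ k ih =>
    intro a m acc hN ha hm hmn hsmall hbig
    rw [PySem.List.pyRange_one_cons (by omega), List.foldl_cons, List.filter_cons]
    by_cases hd : PySem.Int.mod m a = 0
    · have hdvd : a ∣ m := (PySem.Int.mod_eq_zero_iff_dvd m a).1 hd
      have hprime : Prime a :=
        int_prime_of_no_small_dvd a ha
          (fun q hq1 hq2 hq3 => hsmall q hq1 hq2 (hq3.trans hdvd))
      have hdn : a ∣ n := hdvd.trans hmn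
      obtain ⟨hpos', hnd', j, hj⟩ := divOut_spec a ha m.toNat m rfl hm
      have hrd : pvDivOut m a ∣ m := by
        have h0 := dvd_mul_left (pvDivOut m a) (a ^ j)
        rwa [← hj] at h0
      rw [if_pos hd]
      rw [ih (a + 1) (pvDivOut m a) (acc ++ [a]) (by omega) (by omega) hpos'
            (hrd.trans hmn) ?_ ?_]
      · simp [hdn, hprime]
      · intro q hq1 hq2 hq3
        rcases (by omega : q = a ∨ q < a) with h | h
        · subst h; exact hnd' hq3
        · exact hsmall q hq1 h (hq3.trans hrd)
      · intro p hp hap hpn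
        have hpm := hbig p hp (by omega) hpn
        rw [hj] at hpm
        rcases hp.dvd_mul.1 hpm with h | h
        · exfalso
          have h1 : p ∣ a := hp.dvd_of_dvd_pow h
          have h2 : p ≤ a := Int.le_of_dvd (by omega) h1
          omega
        · exact h
    · rw [if_neg hd]
      have hnd : ¬ a ∣ m := fun h => hd ((PySem.Int.mod_eq_zero_iff_dvd m a).2 h)
      have hfalse : (decide (a ∣ n) && decide (Prime a)) = false := by
        by_cases h1 : Prime a
        · by_cases h2 : a ∣ n
          · exact absurd (hbig a h1 le_rfl h2) hnd
          · simp [h2]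
        · simp [h1]
      rw [ih (a + 1) m acc (by omega) (by omega) hm hmn ?_ ?_]
      · simp [hfalse]
      · intro q hq1 hq2 hq3
        rcases (by omega : q = a ∨ q < a) with h | h
        · subst h; exact hnd hq3
        · exact hsmall q hq1 h hq3
      · intro p hp hap hpn
        exact hbig p hp (by omega) hpn

-- ===== VERDICT =====
theorem find_small_factors_spec : Claim_equal_find_small_factors := by
  intro n limit _ hpre
  unfold Spec_find_small_factors find_small_factors find_small_factors_alt
  by_cases hn : n = 0
  · subst hn
    rw [PySem.List.pyRange_one_eq_nil
      (by have h0 : Int.sqrt 0 = 0 := rfl; omega)]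
    simp
  · have hn' : 0 < n := by unfold Pre_find_small_factors at hpre; omega
    rw [loopA n (min limit (Int.sqrt n + 1)) (min limit (Int.sqrt n + 1) - 2).toNat
          2 n [] rfl le_rfl hn' dvd_rfl (fun q hq1 hq2 => by omega)
          (fun p _ _ hp => hp)]
    rw [List.nil_append]
    apply List.filter_congr
    intro p hp
    rw [PySem.List.mem_pyRange_one] at hp
    rw [isPrimeTrial_eq p hp.1]
    congr 1
    rcases em (p ∣ n) with hdv | hdv
    · simp [hdv, (PySem.Int.mod_eq_zero_iff_dvd n p).2 hdv]
    · have hne : ¬ PySem.Int.mod n p = 0 :=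
        fun h => hdv ((PySem.Int.mod_eq_zero_iff_dvd n p).1 h)
      simp [hdv, hne]
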